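-- pv_equiv track=rewrite | github.com/petrov-ivaylo/Honours_Project_Source_Code | D_star_with_time_schedule.py | original_path
-- ===== SOURCE A (Python) =====
-- from collections import OrderedDict # Used to remove duplicates from a given list
--
-- def original_path(paths_to_stations, path):
--     """
--     Finds the original form of the best found path - restores nodes without recharging points, which also should be part of the final form of the best path
--     :param paths_to_stations: dictionary which stores the best path between given two nodes
--     :param path: list representing the best found path for the given vehicle (without nodes without recharging points)
--     :return: list of integers representing the final form of the best found path
--     """
--
--     real_path = []
--     for i in range(len(path)-1):
--         if (path[i], path[i+1]) in paths_to_stations: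
--             for j in paths_to_stations[(path[i], path[i+1])]:
--                 real_path.append(j)
--         elif (path[i+1], path[i]) in paths_to_stations:
--             for j in paths_to_stations[(path[i+1], path[i])][::-1]:
--                 real_path.append(j)
--
--     return list(OrderedDict.fromkeys(real_path))
-- ===== SOURCE B (Python) =====
-- def original_path(paths_to_stations, path):
--     # Expansion as one flattened comprehension; dedup by repeated selection:
--     # take the first element, filter out all its copies, repeat (no set/dict).
--     def sub(a, b):
--         if (a, b) in paths_to_stations:
--             return paths_to_stations[(a, b)]
--         if (b, a) in paths_to_stations:
--             return list(reversed(paths_to_stations[(b, a)]))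
--         return []
--     seq = [j for a, b in zip(path, path[1:]) for j in sub(a, b)]
--     out = []
--     while seq:
--         h = seq[0]
--         out.append(h)
--         seq = [x for x in seq if x != h]
--     return out
-- ===== Notes on version B (the rewrite author's own statement) =====
-- stated objective: alternative
-- what changed: B builds the expanded sequence as one flattened comprehension over consecutive pairs and then deduplicates by repeated selection (take the first element, filter out all its copies, repeat) instead of A's append loops followed by an OrderedDict.fromkeys hash-based dedup; it trades expected O(n) hashing for a simple quadratic filter with no set/dict.
import Mathlib
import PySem

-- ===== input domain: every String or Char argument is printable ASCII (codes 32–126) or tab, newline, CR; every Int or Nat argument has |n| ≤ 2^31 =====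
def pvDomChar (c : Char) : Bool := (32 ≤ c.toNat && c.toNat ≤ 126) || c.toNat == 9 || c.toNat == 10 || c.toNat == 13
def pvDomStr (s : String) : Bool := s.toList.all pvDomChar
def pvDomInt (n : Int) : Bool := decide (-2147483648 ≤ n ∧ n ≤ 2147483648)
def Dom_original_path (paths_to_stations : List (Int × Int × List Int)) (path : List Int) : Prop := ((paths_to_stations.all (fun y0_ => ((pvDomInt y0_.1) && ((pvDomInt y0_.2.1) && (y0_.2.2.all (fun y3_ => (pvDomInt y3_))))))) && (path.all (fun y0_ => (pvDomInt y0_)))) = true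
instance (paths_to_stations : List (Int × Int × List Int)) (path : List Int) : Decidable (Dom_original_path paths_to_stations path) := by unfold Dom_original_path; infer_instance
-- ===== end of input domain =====

-- B replaces A's append loops + OrderedDict dedup with a flattened comprehension and a selection-style filter dedup (objective: alternative).

-- ===== PORT A =====
-- dict lookup on the (Int × Int)-keyed association list: first match
def pvLookup (d : List (Int × Int × List Int)) (a b : Int) : Option (List Int) :=
  match d with
  | [] => none
  | (k1, k2, v) :: rest => if k1 = a ∧ k2 = b then some v else pvLookup rest a b

def original_path (paths_to_stations : List (Int × Int × List Int)) (path : List Int) : List Int :=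
  let real_path := (PySem.List.pyRange 0 ((path.length : Int) - 1) 1).foldl
    (fun acc i =>
      let a := PySem.List.pyGetD path i 0     -- path[i]; i is always in range here
      let b := PySem.List.pyGetD path (i + 1) 0
      match pvLookup paths_to_stations a b with
      | some sub => sub.foldl (fun acc2 j => acc2 ++ [j]) acc
      | none =>
        match pvLookup paths_to_stations b a with
        | some sub => ((PySem.List.slice? sub none none (-1)).getD []).foldl (fun acc2 j => acc2 ++ [j]) acc   -- sub[::-1]
        | none => acc) []
  PySem.List.dedup real_path   -- list(OrderedDict.fromkeys(real_path))

-- ===== PORT B =====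
-- helper 'sub(a, b)' of Source B
def pvSubB (paths : List (Int × Int × List Int)) (a b : Int) : List Int :=
  match pvLookup paths a b with
  | some s => s
  | none =>
    match pvLookup paths b a with
    | some s => s.reverse   -- list(reversed(...))
    | none => []

-- 'while seq: h = seq[0]; out.append(h); seq = [x for x in seq if x != h]'
def pvSelectDedup : List Int → List Int
  | [] => []
  | h :: t => h :: pvSelectDedup ((h :: t).filter (fun x => x ≠ h))
termination_by l => l.length
decreasing_by
  simp only [List.filter_cons, ne_eq, not_true_eq_false, decide_false,
    Bool.false_eq_true, if_false]
  exact Nat.lt_succ_of_le (List.length_filter_le _ _)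

def original_path_alt (paths_to_stations : List (Int × Int × List Int)) (path : List Int) : List Int :=
  let seq := (path.zip path.tail).flatMap (fun p => pvSubB paths_to_stations p.1 p.2)
  pvSelectDedup seq

-- ===== PRECONDITION & SPEC =====
def Spec_original_path (paths_to_stations : List (Int × Int × List Int)) (path : List Int) (out : List Int) : Prop := out = original_path_alt paths_to_stations path
instance (paths_to_stations : List (Int × Int × List Int)) (path : List Int) (out : List Int) : Decidable (Spec_original_path paths_to_stations path out) := by unfold Spec_original_path; infer_instance

-- ===== CLAIM (what is proved, stated in full; the proofs are below) =====
def Claim_equal_original_path : Prop := ∀ (paths_to_stations : List (Int × Int × List Int)) (path : List Int), Dom_original_path paths_to_stations path → Spec_original_path paths_to_stations path (original_path paths_to_stations path)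

-- ===== LEMMAS AND PROOFS =====

-- the concatenation of all sub-paths, pair by pair ('real_path' before dedup)
def pvSegs (paths : List (Int × Int × List Int)) : List Int → List Int
  | a :: b :: rest => pvSubB paths a b ++ pvSegs paths (b :: rest)
  | _ => []

theorem pv_flatMap_segs (paths : List (Int × Int × List Int)) (path : List Int) :
    (PySem.List.pyRange 0 ((path.length : Int) - 1) 1).flatMap
      (fun i => pvSubB paths (PySem.List.pyGetD path i 0) (PySem.List.pyGetD path (i + 1) 0))
      = pvSegs paths path := by
  induction path with
  | nil => rw [PySem.List.pyRange_one_eq_nil (by norm_num)]; rfl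
  | cons a rest ih =>
    cases rest with
    | nil =>
      rw [show ((([a] : List Int).length : Int) - 1) = 0 by simp,
          PySem.List.pyRange_one_eq_nil le_rfl]
      rfl
    | cons b rest' =>
      rw [PySem.List.pyRange_one] at ih ⊢
      rw [show (((((a :: b :: rest').length : Int)) - 1) - 0).toNat = rest'.length + 1 by simp,
          List.range_succ_eq_map, List.map_cons, List.flatMap_cons, List.map_map,
          List.flatMap_map]
      rw [show ((((((b :: rest').length : Int)) - 1) - 0).toNat) = rest'.length by simp,
          List.flatMap_map] at ih
      rw [show pvSegs paths (a :: b :: rest') = pvSubB paths a b ++ pvSegs paths (b :: rest') from rfl,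
          ← ih]
      congr 1
      · norm_num [PySem.List.pyGetD_ofNat']
      · apply List.flatMap_congr
        intro k _
        simp only [Function.comp_apply, Nat.succ_eq_add_one, zero_add]
        rw [show ((k + 1 : Nat) : Int) + 1 = ((k + 2 : Nat) : Int) by push_cast; ring,
            show ((k : Nat) : Int) + 1 = ((k + 1 : Nat) : Int) by push_cast; ring]
        simp only [PySem.List.pyGetD_natCast, List.getD_cons_succ]

theorem original_path_eq_dedup (paths : List (Int × Int × List Int)) (path : List Int) :
    original_path paths path = PySem.List.dedup (pvSegs paths path) := by
  unfold original_path
  have hbody : (fun (acc : List Int) (i : Int) =>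
      let a := PySem.List.pyGetD path i 0
      let b := PySem.List.pyGetD path (i + 1) 0
      match pvLookup paths a b with
      | some sub => sub.foldl (fun acc2 j => acc2 ++ [j]) acc
      | none =>
        match pvLookup paths b a with
        | some sub => ((PySem.List.slice? sub none none (-1)).getD []).foldl (fun acc2 j => acc2 ++ [j]) acc
        | none => acc)
      = (fun acc i => acc ++ pvSubB paths (PySem.List.pyGetD path i 0) (PySem.List.pyGetD path (i + 1) 0)) := by
    funext acc i
    simp only [pvSubB, PySem.List.slice?_none_none_neg_one, Option.getD_some]
    rcases pvLookup paths (PySem.List.pyGetD path i 0) (PySem.List.pyGetD path (i + 1) 0) with _ | sub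
    · rcases pvLookup paths (PySem.List.pyGetD path (i + 1) 0) (PySem.List.pyGetD path i 0) with _ | sub
      · simp
      · exact PySem.List.foldl_append_singleton sub.reverse acc
    · exact PySem.List.foldl_append_singleton sub acc
  rw [hbody, PySem.List.foldl_append_eq_flatMap, List.nil_append, pv_flatMap_segs]

theorem pv_zip_segs (paths : List (Int × Int × List Int)) (path : List Int) :
    (path.zip path.tail).flatMap (fun p => pvSubB paths p.1 p.2) = pvSegs paths path := by
  induction path with
  | nil => rfl
  | cons a rest ih =>
    cases rest with
    | nil => rfl
    | cons b rest' =>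
      show (((a, b) :: (b :: rest').zip rest').flatMap (fun p => pvSubB paths p.1 p.2)) = _
      rw [List.flatMap_cons]
      exact congrArg (pvSubB paths a b ++ ·) ih

-- generalized invariant: PySem.Set.update from seen set s equals s followed by
-- the selection dedup of the elements not yet in s
theorem pv_mem_add {s : List Int} {h x : Int} (hm : h ∈ s) : h ∈ PySem.Set.add s x := by
  unfold PySem.Set.add
  split
  · exact hm
  · exact List.mem_append_left _ hm

theorem pv_update_drop (t : List Int) : ∀ (s : List Int) (h : Int), h ∈ s →
    PySem.Set.update s (t.filter (fun x => x ≠ h)) = PySem.Set.update s t := by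
  induction t with
  | nil => intro s h _; rfl
  | cons x t ih =>
    intro s h hm
    by_cases hx : x = h
    · subst hx
      rw [List.filter_cons_of_neg (by simp)]
      have hadd : PySem.Set.add s x = s := by
        unfold PySem.Set.add
        simp [hm]
      calc PySem.Set.update s (t.filter (fun y => y ≠ x))
          = PySem.Set.update s t := ih s x hm
        _ = PySem.Set.update (PySem.Set.add s x) t := by rw [hadd]
        _ = PySem.Set.update s (x :: t) := rfl
    · rw [List.filter_cons_of_pos (by simp [hx])]
      show PySem.Set.update (PySem.Set.add s x) (t.filter (fun y => y ≠ h)) = PySem.Set.update (PySem.Set.add s x) t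
      exact ih _ h (pv_mem_add hm)

theorem pv_update_eq_select (l : List Int) : ∀ (s : List Int),
    PySem.Set.update s l = s ++ pvSelectDedup (l.filter (fun x => decide (x ∉ s))) := by
  induction l using pvSelectDedup.induct with
  | case1 => intro s; simp [PySem.Set.update, pvSelectDedup]
  | case2 h t ih =>
    intro s
    by_cases hmem : h ∈ s
    · have h1 : PySem.Set.update s (h :: t) = PySem.Set.update s t := by
        have hadd : PySem.Set.add s h = s := by unfold PySem.Set.add; simp [hmem]
        show PySem.Set.update (PySem.Set.add s h) t = _
        rw [hadd]
      have h2 : (h :: t).filter (fun x => decide (x ∉ s)) = t.filter (fun x => decide (x ∉ s)) := by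
        rw [List.filter_cons_of_neg (by simp [hmem])]
      have hff : (t.filter (fun x => x ≠ h)).filter (fun x => decide (x ∉ s))
          = t.filter (fun x => decide (x ∉ s)) := by
        rw [List.filter_filter]
        apply List.filter_congr
        intro x _
        by_cases hxs : x ∈ s
        · simp [hxs]
        · have : x ≠ h := fun he => hxs (he ▸ hmem)
          simp [hxs, this]
      have ihs := ih s
      rw [List.filter_cons_of_neg (by simp)] at ihs
      rw [h1, h2, ← pv_update_drop t s h hmem, ihs, hff]
    · have h1 : PySem.Set.update s (h :: t) = PySem.Set.update (s ++ [h]) t := by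
        have hadd : PySem.Set.add s h = s ++ [h] := by unfold PySem.Set.add; simp [hmem]
        show PySem.Set.update (PySem.Set.add s h) t = _
        rw [hadd]
      have h2 : PySem.Set.update (s ++ [h]) t = PySem.Set.update (s ++ [h]) (t.filter (fun x => x ≠ h)) :=
        (pv_update_drop t (s ++ [h]) h (by simp)).symm
      have ihs := ih (s ++ [h])
      rw [List.filter_cons_of_neg (by simp)] at ihs
      have hsel : pvSelectDedup ((h :: t).filter (fun x => decide (x ∉ s)))
          = h :: pvSelectDedup ((t.filter (fun x => decide (x ∉ s))).filter (fun x => x ≠ h)) := by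
        rw [List.filter_cons_of_pos (by simp [hmem])]
        rw [pvSelectDedup]
        rw [List.filter_cons_of_neg (by simp)]
      have hff : (t.filter (fun x => x ≠ h)).filter (fun x => decide (x ∉ s ++ [h]))
          = (t.filter (fun x => decide (x ∉ s))).filter (fun x => x ≠ h) := by
        rw [List.filter_filter, List.filter_filter]
        apply List.filter_congr
        intro x _
        by_cases hx : x = h <;> by_cases hxs : x ∈ s <;> simp [hx, hxs]
      rw [h1, h2, ihs, hff, hsel, List.append_assoc]
      rfl

theorem pv_dedup_eq_select (l : List Int) : PySem.List.dedup l = pvSelectDedup l := by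
  have := pv_update_eq_select l []
  simpa using this

-- ===== VERDICT (by name: the statement is the Claim_ definition above) =====
theorem original_path_spec : Claim_equal_original_path := by
  intro paths path _
  unfold Spec_original_path
  rw [original_path_eq_dedup, original_path_alt, pv_zip_segs, pv_dedup_eq_select]
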